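-- pv_equiv track=rewrite | github.com/tallcoleman/municipal_finances | src/municipal_finances/fir_instructions/extract_changelog.py | _apply_carry_forward
-- ===== SOURCE A (Python) =====
-- from typing import Any
--
-- def _apply_carry_forward(entries: list[dict[str, Any]]) -> list[dict[str, Any]]:
--     """Fill blank heading values by carrying forward from the previous row.
--
--     Carry-forward rules:
--     - ``heading`` is carried forward within the same ``schedule`` + ``slc_pattern``
--       group (stops when either changes).
--     - ``schedule`` is NOT carried forward; it is always extracted from the row or
--       from the SLC schedule_dup token.
--
--     Args:
--         entries: List of raw entry dicts (in order).
--
--     Returns: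
--         Same list with heading gaps filled in-place.
--     """
--     prev_heading: str | None = None
--     prev_schedule: str | None = None
--     prev_slc: str | None = None
--
--     for entry in entries:
--         sched = entry.get("schedule")
--         slc = entry.get("slc_pattern")
--
--         # Reset carry-forward if schedule or SLC changes
--         if sched != prev_schedule or slc != prev_slc:
--             prev_heading = None
--
--         heading = entry.get("heading")
--         if not heading and prev_heading:
--             entry["heading"] = prev_heading
--         elif heading:
--             prev_heading = heading
--
--         prev_schedule = sched
--         prev_slc = slc
--
--     return entries
-- ===== SOURCE B (Python) =====
-- def _apply_carry_forward(entries):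
--     """Fill blank heading values by carrying forward within each consecutive
--     run of equal (schedule, slc_pattern); mutates the dicts in place."""
--     i = 0
--     n = len(entries)
--     while i < n:
--         key = (entries[i].get("schedule"), entries[i].get("slc_pattern"))
--         j = i + 1
--         while j < n and (entries[j].get("schedule"), entries[j].get("slc_pattern")) == key:
--             j += 1
--         last = None
--         for entry in entries[i:j]:
--             h = entry.get("heading")
--             if not h and last:
--                 entry["heading"] = last
--             elif h:
--                 last = h
--         i = j
--     return entries
-- ===== Notes on version B (the rewrite author's own statement) =====
-- stated objective: alternative
-- what changed: A makes a single stateful pass carrying (prev_heading, prev_schedule, prev_slc) and resetting on key changes; B first splits the list into maximal consecutive runs of equal (schedule, slc_pattern) and then fills headings within each run with a local carry, with no reset logic.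
import Mathlib
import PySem

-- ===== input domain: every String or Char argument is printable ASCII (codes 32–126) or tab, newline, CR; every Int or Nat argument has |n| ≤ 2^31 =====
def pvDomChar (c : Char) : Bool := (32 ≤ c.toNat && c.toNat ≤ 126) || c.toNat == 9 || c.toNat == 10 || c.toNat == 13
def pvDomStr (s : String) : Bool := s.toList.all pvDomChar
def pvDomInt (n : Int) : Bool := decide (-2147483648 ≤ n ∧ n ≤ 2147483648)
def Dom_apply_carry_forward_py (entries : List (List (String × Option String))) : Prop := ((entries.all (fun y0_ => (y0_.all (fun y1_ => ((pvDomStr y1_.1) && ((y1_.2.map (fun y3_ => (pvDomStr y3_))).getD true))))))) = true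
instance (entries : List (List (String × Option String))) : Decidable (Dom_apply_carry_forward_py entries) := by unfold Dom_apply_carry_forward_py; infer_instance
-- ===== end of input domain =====

-- B restructures A's single stateful pass into an outer loop over maximal runs of equal
-- (schedule, slc_pattern) with a local carry inside each run (objective: alternative decomposition).
-- A mutates the entry dicts in place and returns the same list; the equivalence proved here is
-- about the returned value (B performs the same in-place mutation in Python).

-- shared dict accessors (entry.get(k) with default None, and entry[k] = v)
def pvGet (e : List (String × Option String)) (k : String) : Option String :=
  match e with
  | [] => none
  | (k', v) :: rest => if k' == k then v else pvGet rest k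

def pvSet (e : List (String × Option String)) (k : String) (v : Option String) :
    List (String × Option String) :=
  match e with
  | [] => [(k, v)]
  | (k', v') :: rest => if k' == k then (k', v) :: rest else (k', v') :: pvSet rest k v

-- Python truthiness of a str-or-None value
def pvTruthy : Option String → Bool
  | none => false
  | some s => !(s == "")

-- ===== PORT A =====
-- one pass with state (prev_heading, prev_schedule, prev_slc), resetting on a key change
def goA (prevH prevS prevSlc : Option String) :
    List (List (String × Option String)) → List (List (String × Option String))
  | [] => []
  | e :: rest =>
    let sched := pvGet e "schedule"
    let slc := pvGet e "slc_pattern"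
    let prevH' := if !(sched == prevS) || !(slc == prevSlc) then none else prevH
    let heading := pvGet e "heading"
    if !(pvTruthy heading) && pvTruthy prevH' then
      pvSet e "heading" prevH' :: goA prevH' sched slc rest
    else if pvTruthy heading then
      e :: goA heading sched slc rest
    else
      e :: goA prevH' sched slc rest

def apply_carry_forward_py (entries : List (List (String × Option String))) :
    List (List (String × Option String)) :=
  goA none none none entries

-- ===== PORT B =====
def keyB (e : List (String × Option String)) : Option String × Option String :=
  (pvGet e "schedule", pvGet e "slc_pattern")

-- carry-forward inside one run (no resets)
def runCarry (last : Option String) :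
    List (List (String × Option String)) → List (List (String × Option String))
  | [] => []
  | e :: rest =>
    let h := pvGet e "heading"
    if !(pvTruthy h) && pvTruthy last then
      pvSet e "heading" last :: runCarry last rest
    else if pvTruthy h then
      e :: runCarry h rest
    else
      e :: runCarry last rest

-- outer loop: peel off the maximal run with the head's key, recurse on the remainder
def apply_carry_forward_py_alt (entries : List (List (String × Option String))) :
    List (List (String × Option String)) :=
  match entries with
  | [] => []
  | e :: rest =>
    let k := keyB e
    runCarry none (e :: rest.takeWhile (fun x => keyB x == k)) ++
      apply_carry_forward_py_alt (rest.dropWhile (fun x => keyB x == k))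
termination_by entries.length
decreasing_by
  simp only [List.length_cons]
  exact Nat.lt_succ_of_le (List.length_dropWhile_le _ _)

-- ===== PRECONDITION & SPEC =====
def Spec_apply_carry_forward_py (entries : List (List (String × Option String))) (out : List (List (String × Option String))) : Prop := out = apply_carry_forward_py_alt entries
instance (entries : List (List (String × Option String))) (out : List (List (String × Option String))) : Decidable (Spec_apply_carry_forward_py entries out) := by unfold Spec_apply_carry_forward_py; infer_instance

-- ===== CLAIM (what is proved, stated in full; the proofs are below) =====
def Claim_equal_apply_carry_forward_py : Prop := ∀ (entries : List (List (String × Option String))), Dom_apply_carry_forward_py entries → Spec_apply_carry_forward_py entries (apply_carry_forward_py entries)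

-- ===== LEMMAS AND PROOFS =====

-- the heading-state update both loops perform on one row
def stepH (last : Option String) (e : List (String × Option String)) : Option String :=
  if pvTruthy (pvGet e "heading") then pvGet e "heading" else last

-- inside a run whose key equals the current state, goA never resets and agrees with runCarry
theorem goA_run (run : List (List (String × Option String))) :
    ∀ (rest : List (List (String × Option String))) (last k1 k2 : Option String),
    (∀ e ∈ run, pvGet e "schedule" = k1 ∧ pvGet e "slc_pattern" = k2) →
    goA last k1 k2 (run ++ rest) =
      runCarry last run ++ goA (run.foldl stepH last) k1 k2 rest := by
  induction run with
  | nil => intro rest last k1 k2 _; simp [runCarry]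
  | cons e t ih =>
    intro rest last k1 k2 hk
    obtain ⟨h1, h2⟩ := hk e (List.mem_cons_self)
    have ht : ∀ x ∈ t, pvGet x "schedule" = k1 ∧ pvGet x "slc_pattern" = k2 :=
      fun x hx => hk x (List.mem_cons_of_mem _ hx)
    simp only [List.cons_append, goA, runCarry, List.foldl_cons, stepH, h1, h2,
      beq_self_eq_true, Bool.not_true, Bool.or_self, Bool.false_eq_true, if_false]
    simp only [ih rest (pvGet e "heading") k1 k2 ht, ih rest last k1 k2 ht]
    split_ifs with hab hb <;> simp_all [List.cons_append]

-- when the head's key differs from the state, the carried heading is reset anyway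
theorem goA_reset (e : List (String × Option String))
    (rest : List (List (String × Option String))) (last k1 k2 : Option String)
    (h : ¬ (pvGet e "schedule" = k1 ∧ pvGet e "slc_pattern" = k2)) :
    goA last k1 k2 (e :: rest) = goA none k1 k2 (e :: rest) := by
  have hc : (!(pvGet e "schedule" == k1) || !(pvGet e "slc_pattern" == k2)) = true := by
    rcases Decidable.not_and_iff_not_or_not.mp h with h1 | h1 <;>
      simp [beq_eq_false_iff_ne, h1]
  simp only [goA, hc, if_true, ite_self]

-- the first row of a run is processed identically by goA (with no carried heading) and runCarry
theorem goA_head_none (e : List (String × Option String))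
    (rest : List (List (String × Option String))) (k1 k2 : Option String) :
    goA none k1 k2 (e :: rest) =
      e :: goA (stepH none e) (pvGet e "schedule") (pvGet e "slc_pattern") rest := by
  simp only [goA, ite_self, pvTruthy, Bool.and_false, Bool.false_eq_true, if_false, stepH]
  split <;> rfl

theorem runCarry_head_none (e : List (String × Option String))
    (t : List (List (String × Option String))) :
    runCarry none (e :: t) = e :: runCarry (stepH none e) t := by
  simp only [runCarry, pvTruthy, Bool.and_false, Bool.false_eq_true, if_false, stepH]
  split <;> rfl

-- main bridge: with no carried heading, goA is the run decomposition, whatever the key state is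
theorem goA_eq_alt : ∀ (entries : List (List (String × Option String))) (s slc : Option String),
    goA none s slc entries = apply_carry_forward_py_alt entries
  | [], _, _ => by rw [apply_carry_forward_py_alt]; rfl
  | e :: rest, s, slc => by
    have hsplit : rest = rest.takeWhile (fun x => keyB x == keyB e) ++
        rest.dropWhile (fun x => keyB x == keyB e) := (List.takeWhile_append_dropWhile).symm
    have hrun : ∀ x ∈ rest.takeWhile (fun x => keyB x == keyB e),
        pvGet x "schedule" = pvGet e "schedule" ∧ pvGet x "slc_pattern" = pvGet e "slc_pattern" := by
      intro x hx
      have := List.mem_takeWhile_imp hx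
      simp only [beq_iff_eq, keyB, Prod.mk.injEq] at this
      exact this
    -- process the head row, then the rest of its run via goA_run
    rw [goA_head_none]
    conv_lhs => rw [hsplit]
    rw [goA_run _ _ _ _ _ hrun]
    have halt : apply_carry_forward_py_alt (e :: rest) =
        runCarry none (e :: rest.takeWhile (fun x => keyB x == keyB e)) ++
          apply_carry_forward_py_alt (rest.dropWhile (fun x => keyB x == keyB e)) := by
      rw [apply_carry_forward_py_alt]
    rw [halt, runCarry_head_none]
    simp only [List.cons_append, List.cons.injEq, true_and]
    congr 1
    -- the remainder: either empty, or its head has a different key, so the state resets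
    cases hd : rest.dropWhile (fun x => keyB x == keyB e) with
    | nil => simp [goA, apply_carry_forward_py_alt]
    | cons e2 t2 =>
      have hne : ¬ (pvGet e2 "schedule" = pvGet e "schedule" ∧
          pvGet e2 "slc_pattern" = pvGet e "slc_pattern") := by
        have hthis := List.head?_dropWhile_not (fun x => keyB x == keyB e) rest
        rw [hd] at hthis
        simp only [List.head?_cons] at hthis
        intro hcontra
        simp [keyB, hcontra.1, hcontra.2] at hthis
      rw [goA_reset _ _ _ _ _ hne]
      exact goA_eq_alt (e2 :: t2) _ _
  termination_by entries _ _ => entries.length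
  decreasing_by
    have hle := List.length_dropWhile_le (fun x => keyB x == keyB e) rest
    rw [hd] at hle
    simp only [List.length_cons] at hle ⊢
    omega

-- ===== VERDICT (by name: the statement is the Claim_ definition above) =====
theorem apply_carry_forward_py_spec : Claim_equal_apply_carry_forward_py := by
  intro entries _
  unfold Spec_apply_carry_forward_py apply_carry_forward_py
  exact goA_eq_alt entries none none
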